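-- pv_equiv track=rewrite | github.com/wentao709/Data-Mining | SON_algorithm/task1.py | phase2
-- ===== SOURCE A (Python) =====
-- def phase2(basket, candidate1):
--     basket = tuple(basket)
--     res = [] # store all the candidates
--     for element in candidate1:
--         set_ele = set(element)
--         for tuples in basket:  # each element go through all baskets, store each element with number 1. so like (candidate, 1)
--             if set_ele.issubset(tuples):
--                 res.append((tuple(sorted(tuple(set_ele))), 1))
--     return res
-- ===== SOURCE B (Python) =====
-- def phase2(basket, candidate1):
--     # Inverted index: item -> set of basket indices containing it.
--     index = {}
--     n = 0
--     for b in basket: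
--         for item in set(b):
--             index.setdefault(item, set()).add(n)
--         n += 1
--     res = []
--     for element in candidate1:
--         items = sorted(set(element))
--         if items:
--             common = index.get(items[0], set())
--             for it in items[1:]:
--                 common = common & index.get(it, set())
--             cnt = len(common)
--         else:
--             cnt = n
--         res.extend([(tuple(items), 1)] * cnt)
--     return res
-- ===== Notes on version B (the rewrite author's own statement) =====
-- stated objective: faster
-- what changed: Replaces A's per-candidate scan over all baskets with a subset test each by an inverted index (item -> set of basket indices) built once, intersecting posting sets per candidate and emitting the matched count of pairs at once.
import Mathlib
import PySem

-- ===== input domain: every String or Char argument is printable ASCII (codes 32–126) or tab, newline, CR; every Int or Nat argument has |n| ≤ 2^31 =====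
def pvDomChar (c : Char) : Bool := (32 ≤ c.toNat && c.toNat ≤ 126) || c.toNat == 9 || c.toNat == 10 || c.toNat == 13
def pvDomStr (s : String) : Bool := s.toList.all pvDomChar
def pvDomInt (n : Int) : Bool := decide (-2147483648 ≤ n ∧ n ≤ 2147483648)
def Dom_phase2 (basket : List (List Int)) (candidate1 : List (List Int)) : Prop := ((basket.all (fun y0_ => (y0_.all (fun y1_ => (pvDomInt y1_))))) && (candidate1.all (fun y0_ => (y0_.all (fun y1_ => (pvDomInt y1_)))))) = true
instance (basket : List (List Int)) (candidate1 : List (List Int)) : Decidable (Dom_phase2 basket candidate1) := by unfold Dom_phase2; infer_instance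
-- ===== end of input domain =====

-- B replaces A's candidate×basket subset scan by an inverted index (item → set of basket
-- indices) and intersects posting sets per candidate, emitting the count of matches at once.

-- ===== PORT A =====
def phase2 (basket : List (List Int)) (candidate1 : List (List Int)) : List (List Int × Int) :=
  candidate1.foldl (fun res element =>
    let set_ele : PySem.Set Int := PySem.Set.ofList element
    basket.foldl (fun res tuples =>
      if PySem.Set.issubset set_ele tuples then
        res ++ [(PySem.List.sorted set_ele (fun x => x) false, (1 : Int))]
      else res) res) []

-- ===== PORT B =====
-- 'for b in basket: for item in set(b): index.setdefault(item, set()).add(n); n += 1'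
def pvIndexStep (p : PySem.Dict Int (PySem.Set Int) × Int) (b : List Int) :
    PySem.Dict Int (PySem.Set Int) × Int :=
  ((PySem.Set.ofList b).foldl
      (fun d item => d.modify item PySem.Set.empty (fun s => PySem.Set.add s p.2)) p.1,
   p.2 + 1)

def phase2_alt (basket : List (List Int)) (candidate1 : List (List Int)) : List (List Int × Int) :=
  let st := basket.foldl pvIndexStep (PySem.Dict.empty, 0)
  let index := st.1
  let n := st.2
  candidate1.foldl (fun res element =>
    let items := PySem.List.sorted (PySem.Set.ofList element) (fun x => x) false
    let cnt : Int :=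
      match items with
      | [] => n
      | it0 :: rest =>
          ((rest.foldl (fun common it => PySem.Set.inter common (index.getD it PySem.Set.empty))
              (index.getD it0 PySem.Set.empty)).length : Int)
    res ++ PySem.List.pyRepeat [(items, (1 : Int))] cnt) []

-- ===== PRECONDITION & SPEC =====
def Spec_phase2 (basket : List (List Int)) (candidate1 : List (List Int)) (out : List (List Int × Int)) : Prop := out = phase2_alt basket candidate1
instance (basket : List (List Int)) (candidate1 : List (List Int)) (out : List (List Int × Int)) : Decidable (Spec_phase2 basket candidate1 out) := by unfold Spec_phase2; infer_instance

-- ===== CLAIM (what is proved, stated in full; the proofs are below) =====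
def Claim_equal_phase2 : Prop := ∀ (basket : List (List Int)) (candidate1 : List (List Int)), Dom_phase2 basket candidate1 → Spec_phase2 basket candidate1 (phase2 basket candidate1)

-- ===== LEMMAS AND PROOFS =====

-- One basket's inner loop: each key of set(b) gets the index n added, others unchanged.
theorem pv_getD_modify_fold (ks : List Int) (d : PySem.Dict Int (PySem.Set Int)) (n it : Int) :
    (ks.foldl (fun d item => d.modify item PySem.Set.empty (fun s => PySem.Set.add s n)) d).getD
        it PySem.Set.empty =
      if it ∈ ks then PySem.Set.add (d.getD it PySem.Set.empty) n
      else d.getD it PySem.Set.empty := by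
  induction ks generalizing d with
  | nil => simp
  | cons k ks ih =>
      simp only [List.foldl_cons, ih, PySem.Dict.getD_modify, List.mem_cons]
      by_cases hk : it = k
      · subst hk
        by_cases hm : it ∈ ks <;> simp [hm, PySem.Set.add_of_mem, PySem.Set.mem_add]
      · by_cases hm : it ∈ ks <;> simp [hk, hm]

-- Index-building invariant, second component: the final counter.
theorem pv_idx_snd (basket : List (List Int)) (d0 : PySem.Dict Int (PySem.Set Int)) (n0 : Int) :
    (basket.foldl pvIndexStep (d0, n0)).2 = n0 + basket.length := by
  induction basket generalizing d0 n0 with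
  | nil => simp
  | cons b bs ih =>
      simp only [List.foldl_cons, pvIndexStep, ih, List.length_cons]
      push_cast; ring

-- Index-building invariant, membership: j is in the posting set of it iff it was there
-- initially or some basket (counted from n0) contains it.
theorem pv_idx_mem (basket : List (List Int)) (d0 : PySem.Dict Int (PySem.Set Int)) (n0 : Int)
    (it j : Int) :
    j ∈ (basket.foldl pvIndexStep (d0, n0)).1.getD it PySem.Set.empty ↔
      j ∈ d0.getD it PySem.Set.empty ∨
        ∃ k : Nat, k < basket.length ∧ j = n0 + (k : Int) ∧ it ∈ basket.getD k [] := by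
  induction basket generalizing d0 n0 with
  | nil => simp
  | cons b bs ih =>
      simp only [List.foldl_cons, pvIndexStep, ih]
      rw [pv_getD_modify_fold]
      constructor
      · rintro (h | ⟨k, hk, hj, hmem⟩)
        · by_cases hb : it ∈ PySem.Set.ofList b
          · rw [if_pos hb] at h
            rcases (PySem.Set.mem_add _ _ _).1 h with h' | h'
            · exact Or.inl h'
            · exact Or.inr ⟨0, by simp, by simpa using h', by
                simpa using (PySem.Set.mem_ofList b it).1 hb⟩
          · rw [if_neg hb] at h; exact Or.inl h
        · exact Or.inr ⟨k + 1, by simpa using hk, by push_cast at hj ⊢; omega, by simpa using hmem⟩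
      · rintro (h | ⟨k, hk, hj, hmem⟩)
        · by_cases hb : it ∈ PySem.Set.ofList b
          · rw [if_pos hb]; exact Or.inl ((PySem.Set.mem_add _ _ _).2 (Or.inl h))
          · rw [if_neg hb]; exact Or.inl h
        · cases k with
          | zero =>
              simp only [List.getD_cons_zero] at hmem
              have hb : it ∈ PySem.Set.ofList b := (PySem.Set.mem_ofList b it).2 hmem
              rw [if_pos hb]
              exact Or.inl ((PySem.Set.mem_add _ _ _).2 (Or.inr (by simpa using hj)))
          | succ k =>
              refine Or.inr ⟨k, by simpa using hk, by push_cast at hj ⊢; omega, by simpa using hmem⟩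

-- Posting sets stay duplicate-free.
theorem pv_idx_nodup (basket : List (List Int)) (d0 : PySem.Dict Int (PySem.Set Int)) (n0 : Int)
    (h : ∀ it : Int, ((d0.getD it PySem.Set.empty : PySem.Set Int)).Nodup) (it : Int) :
    ((basket.foldl pvIndexStep (d0, n0)).1.getD it PySem.Set.empty : PySem.Set Int).Nodup := by
  induction basket generalizing d0 n0 with
  | nil => exact h it
  | cons b bs ih =>
      simp only [List.foldl_cons, pvIndexStep]
      refine ih _ _ (fun it' => ?_)
      rw [pv_getD_modify_fold]
      by_cases hb : it' ∈ PySem.Set.ofList b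
      · rw [if_pos hb]; exact PySem.Set.nodup_add _ _ (h it')
      · rw [if_neg hb]; exact h it'

-- The intersection loop: membership in every posting set.
theorem pv_common_mem (rest : List Int) (index : PySem.Dict Int (PySem.Set Int))
    (init : PySem.Set Int) (j : Int) :
    j ∈ rest.foldl (fun common it => PySem.Set.inter common (index.getD it PySem.Set.empty)) init ↔
      j ∈ init ∧ ∀ it ∈ rest, j ∈ index.getD it PySem.Set.empty := by
  induction rest generalizing init with
  | nil => simp
  | cons r rs ih =>
      simp only [List.foldl_cons, ih, PySem.Set.mem_inter, List.mem_cons]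
      constructor
      · rintro ⟨⟨h1, h2⟩, h3⟩
        exact ⟨h1, fun it hit => by rcases hit with rfl | hit; exact h2; exact h3 it hit⟩
      · rintro ⟨h1, h2⟩
        exact ⟨⟨h1, h2 r (Or.inl rfl)⟩, fun it hit => h2 it (Or.inr hit)⟩

theorem pv_common_nodup (rest : List Int) (index : PySem.Dict Int (PySem.Set Int))
    (init : PySem.Set Int) (h : init.Nodup) :
    (rest.foldl (fun common it => PySem.Set.inter common (index.getD it PySem.Set.empty))
        init).Nodup := by
  induction rest generalizing init with
  | nil => exact h
  | cons r rs ih => exact ih _ (PySem.Set.nodup_inter _ _ h)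

-- countP of a list as a countP over its index range.
theorem pv_countP_index (l : List (List Int)) (p : List Int → Bool) :
    l.countP p = (List.range l.length).countP (fun k => p (l.getD k [])) := by
  induction l using List.reverseRecOn with
  | nil => simp
  | append_singleton xs x ih =>
      rw [List.countP_append, List.length_append, List.length_singleton, List.range_succ,
        List.countP_append, ih]
      congr 1
      · exact List.countP_congr (fun k hk => by
          rw [List.getD_append _ _ _ _ (List.mem_range.1 hk)])
      · simp

-- The count a candidate's intersection produces equals A's number of matching baskets.
theorem pv_cnt_eq (basket : List (List Int)) (it0 : Int) (rest : List Int) :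
    ((rest.foldl
        (fun common it =>
          PySem.Set.inter common
            ((basket.foldl pvIndexStep (PySem.Dict.empty, 0)).1.getD it PySem.Set.empty))
        ((basket.foldl pvIndexStep (PySem.Dict.empty, 0)).1.getD it0 PySem.Set.empty)).length : Int) =
      (basket.countP (fun t => (it0 :: rest).all (fun it => t.contains it)) : Int) := by
  set index := (basket.foldl pvIndexStep (PySem.Dict.empty, 0)).1 with hidx
  have hmem : ∀ it j : Int, j ∈ index.getD it PySem.Set.empty ↔
      ∃ k : Nat, k < basket.length ∧ j = (k : Int) ∧ it ∈ basket.getD k [] := by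
    intro it j
    rw [hidx, pv_idx_mem]
    simp
  have hnd : ∀ it : Int, (index.getD it PySem.Set.empty : PySem.Set Int).Nodup := by
    intro it
    rw [hidx]
    exact pv_idx_nodup basket _ 0 (fun it' => by simp) it
  set common := rest.foldl
      (fun common it => PySem.Set.inter common (index.getD it PySem.Set.empty))
      (index.getD it0 PySem.Set.empty) with hc
  have hcm : ∀ j : Int, j ∈ common ↔
      ∃ k : Nat, k < basket.length ∧ j = (k : Int) ∧
        ∀ it ∈ (it0 :: rest), it ∈ basket.getD k [] := by
    intro j
    rw [hc, pv_common_mem]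
    constructor
    · rintro ⟨h0, hr⟩
      rcases (hmem it0 j).1 h0 with ⟨k, hk, hj, hm0⟩
      refine ⟨k, hk, hj, fun it hit => ?_⟩
      rcases List.mem_cons.1 hit with rfl | hit
      · exact hm0
      · rcases (hmem it j).1 (hr it hit) with ⟨k', hk', hj', hm'⟩
        have : k' = k := by
          have : (k' : Int) = (k : Int) := by omega
          exact_mod_cast this
        subst this; exact hm'
    · rintro ⟨k, hk, hj, hall⟩
      exact ⟨(hmem it0 j).2 ⟨k, hk, hj, hall it0 (by simp)⟩,
        fun it hit => (hmem it j).2 ⟨k, hk, hj, hall it (by simp [hit])⟩⟩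
  have hcnd : common.Nodup := pv_common_nodup _ _ _ (hnd it0)
  -- compare with the explicit index list
  set L := ((List.range basket.length).filter
      (fun k => (it0 :: rest).all (fun it => (basket.getD k []).contains it))).map
      (fun k : Nat => (k : Int)) with hL
  have hLnd : L.Nodup := by
    rw [hL]
    exact (List.Nodup.filter _ (List.nodup_range)).map (fun a b h => by exact_mod_cast h)
  have hsame : ∀ j : Int, j ∈ common ↔ j ∈ L := by
    intro j
    rw [hcm, hL]
    simp only [List.mem_map, List.mem_filter, List.mem_range, List.all_eq_true,
      List.contains_iff_mem]
    constructor
    · rintro ⟨k, hk, hj, hall⟩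
      exact ⟨k, ⟨hk, fun it hit => hall it hit⟩, hj.symm⟩
    · rintro ⟨k, ⟨hk, hall⟩, hj⟩
      exact ⟨k, hk, hj.symm, fun it hit => hall it hit⟩
  have hperm : common.Perm L := (List.perm_ext_iff_of_nodup hcnd hLnd).2 hsame
  have hlen : common.length = L.length := hperm.length_eq
  rw [hlen, hL, List.length_map, ← List.countP_eq_length_filter,
    pv_countP_index basket (fun t => (it0 :: rest).all (fun it => t.contains it))]

-- A's inner loop over baskets, per candidate, equals B's replicate chunk.
theorem pv_chunk_eq (basket : List (List Int)) (element : List Int)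
    (res : List (List Int × Int)) :
    (basket.foldl (fun res tuples =>
        if PySem.Set.issubset (PySem.Set.ofList element) tuples then
          res ++ [(PySem.List.sorted (PySem.Set.ofList element) (fun x => x) false, (1 : Int))]
        else res) res) =
      res ++ PySem.List.pyRepeat
          [(PySem.List.sorted (PySem.Set.ofList element) (fun x => x) false, (1 : Int))]
          (match PySem.List.sorted (PySem.Set.ofList element) (fun x => x) false with
           | [] => ((basket.foldl pvIndexStep (PySem.Dict.empty, 0)).2 : Int)
           | it0 :: rest =>
               ((rest.foldl (fun common it =>
                   PySem.Set.inter common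
                     ((basket.foldl pvIndexStep (PySem.Dict.empty, 0)).1.getD it PySem.Set.empty))
                 ((basket.foldl pvIndexStep (PySem.Dict.empty, 0)).1.getD it0
                   PySem.Set.empty)).length : Int)) := by
  rw [PySem.List.foldl_append_if
      (p := fun tuples => PySem.Set.issubset (PySem.Set.ofList element) tuples)
      (f := fun _ => (PySem.List.sorted (PySem.Set.ofList element) (fun x => x) false, (1 : Int)))]
  congr 1
  rcases hit : PySem.List.sorted (PySem.Set.ofList element) (fun x => x) false with _ | ⟨it0, rest⟩
  · have he : PySem.Set.ofList element = ([] : List Int) :=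
      (PySem.List.sorted_eq_nil_iff _ _ _).1 hit
    have hall : ∀ t ∈ basket, PySem.Set.issubset (PySem.Set.ofList element) t = true := by
      intro t _
      rw [he]
      exact (PySem.Set.issubset_iff _ _).2 (by simp)
    rw [List.filter_eq_self.2 hall, List.map_const']
    simp only [pv_idx_snd, PySem.List.pyRepeat_singleton]
    simp
  · simp only [pv_cnt_eq, PySem.List.pyRepeat_singleton, Int.toNat_natCast, List.map_const']
    congr 1
    rw [← List.countP_eq_length_filter]
    refine List.countP_congr (fun t _ => ?_)
    have hperm := PySem.List.sorted_perm (PySem.Set.ofList element) (fun x : Int => x) false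
    rw [hit] at hperm
    rw [PySem.Set.issubset_iff, List.all_eq_true]
    constructor
    · intro h it hitm
      simpa [List.contains_iff_mem] using h it (hperm.mem_iff.1 hitm)
    · intro h x hx
      simpa [List.contains_iff_mem] using h x (hperm.mem_iff.2 hx)

-- ===== VERDICT (by name: the statement is the Claim_ definition above) =====
theorem phase2_spec : Claim_equal_phase2 := by
  intro basket candidate1 _
  unfold Spec_phase2 phase2 phase2_alt
  exact PySem.List.foldl_congr_mem candidate1 _ _ []
    (fun res element _ => pv_chunk_eq basket element res)
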